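-- pv_equiv track=rewrite | github.com/luccauchon/webear | src/optimizers/roulette_hyperparameter_search_optuna_2.py | get_unique_combinations
-- ===== SOURCE A (Python) =====
-- import itertools
--
-- def get_unique_combinations(min_val, max_val, max_slots, _cache, _step):
--     """
--     Generates all unique, strictly increasing combinations of numbers
--     from min_val to max_val with lengths from 0 up to max_slots.
--     """
--     cache_key = (min_val, max_val, max_slots, _step)
--
--     if cache_key in _cache:
--         return _cache[cache_key]
--
--     all_combos = []
--     number_pool = range(min_val, max_val + 1, _step)
--     total_available = len(number_pool)
--
--     for r in range(0, max_slots + 1):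
--         if r > total_available:
--             break
--         all_combos.extend(itertools.combinations(number_pool, r))
--
--     _cache[cache_key] = all_combos
--     return all_combos
-- ===== SOURCE B (Python) =====
-- def get_unique_combinations(min_val, max_val, max_slots, _cache, _step):
--     """Level-by-level construction: each length-(r+1) combination extends a
--     length-r one by a later pool element, instead of calling itertools.combinations per length."""
--     cache_key = (min_val, max_val, max_slots, _step)
--     if cache_key in _cache:
--         return _cache[cache_key]
--     pool = list(range(min_val, max_val + 1, _step))
--     n = len(pool)
--     all_combos = []
--     current = []
--     if max_slots >= 0:
--         all_combos.append(())
--         current = [(0, ())]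
--     for _ in range(1, max_slots + 1):
--         nxt = [(j + 1, c + (pool[j],)) for (s, c) in current for j in range(s, n)]
--         if not nxt:
--             break
--         all_combos.extend(c for (_, c) in nxt)
--         current = nxt
--     _cache[cache_key] = all_combos
--     return all_combos
-- ===== Notes on version B (the rewrite author's own statement) =====
-- stated objective: alternative
-- what changed: Replaces the per-length itertools.combinations calls with an incremental level-by-level construction: each length-(r+1) combination extends a length-r one by a later pool element (tracked by index), stopping when a level comes out empty; the cache wrapper is kept.
import Mathlib
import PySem

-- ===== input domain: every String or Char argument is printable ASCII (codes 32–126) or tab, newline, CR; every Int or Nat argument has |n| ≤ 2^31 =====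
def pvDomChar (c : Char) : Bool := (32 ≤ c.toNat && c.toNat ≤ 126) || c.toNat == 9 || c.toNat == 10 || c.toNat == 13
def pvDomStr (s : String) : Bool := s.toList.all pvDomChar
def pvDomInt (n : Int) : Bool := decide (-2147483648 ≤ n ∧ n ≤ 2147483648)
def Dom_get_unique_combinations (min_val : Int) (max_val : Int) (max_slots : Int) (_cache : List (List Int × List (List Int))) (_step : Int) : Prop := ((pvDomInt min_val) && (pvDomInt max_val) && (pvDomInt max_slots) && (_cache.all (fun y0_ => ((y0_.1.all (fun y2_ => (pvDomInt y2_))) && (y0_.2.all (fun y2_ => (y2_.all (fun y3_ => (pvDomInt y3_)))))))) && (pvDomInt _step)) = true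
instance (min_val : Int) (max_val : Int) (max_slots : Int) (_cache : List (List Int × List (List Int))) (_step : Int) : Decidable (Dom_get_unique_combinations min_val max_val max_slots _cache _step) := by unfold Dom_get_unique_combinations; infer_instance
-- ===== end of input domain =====

-- B builds the combinations level by level (extending each combo by later pool elements)
-- instead of calling itertools.combinations per length; equivalence is about the RETURN
-- value (both Pythons also perform the same in-place cache insertion).

-- ===== PORT A =====
-- itertools.combinations(pool, r) in pool order (lexicographic by index), as a list of lists
def pvCombos : Nat → List Int → List (List Int)
  | 0, _ => [[]]
  | _ + 1, [] => []
  | r + 1, x :: xs => (pvCombos r xs).map (fun t => x :: t) ++ pvCombos (r + 1) xs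

-- the 'for r in range(0, max_slots + 1): if r > total_available: break; extend' loop
def pvALoop (pool : List Int) : Nat → Nat → List (List Int) → List (List Int)
  | 0, _, acc => acc
  | fuel + 1, r, acc =>
    if ((r : Int) > (pool.length : Int)) then acc
    else pvALoop pool fuel (r + 1) (acc ++ pvCombos r pool)

def get_unique_combinations (min_val : Int) (max_val : Int) (max_slots : Int) (_cache : List (List Int × List (List Int))) (_step : Int) : List (List Int) :=
  let cache_key := [min_val, max_val, max_slots, _step]
  match List.lookup cache_key _cache with
  | some v => v
  | none =>
    let pool := PySem.List.pyRange min_val (max_val + 1) _step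
    pvALoop pool (max_slots + 1).toNat 0 []

-- ===== PORT B =====
-- one level step: [(j + 1, c + (pool[j],)) for (s, c) in current for j in range(s, n)]
def pvBStep (pool : List Int) (n : Nat) (current : List (Nat × List Int)) : List (Nat × List Int) :=
  current.flatMap (fun sc => (List.range' sc.1 (n - sc.1)).map (fun j => (j + 1, sc.2 ++ [pool.getD j 0])))

-- the 'for _ in range(1, max_slots + 1): …; if not nxt: break; …' loop
def pvBLoop (pool : List Int) (n : Nat) : Nat → List (Nat × List Int) → List (List Int) → List (List Int)
  | 0, _, acc => acc
  | fuel + 1, current, acc =>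
    let nxt := pvBStep pool n current
    if nxt.isEmpty then acc
    else pvBLoop pool n fuel nxt (acc ++ nxt.map Prod.snd)

def get_unique_combinations_alt (min_val : Int) (max_val : Int) (max_slots : Int) (_cache : List (List Int × List (List Int))) (_step : Int) : List (List Int) :=
  let cache_key := [min_val, max_val, max_slots, _step]
  match List.lookup cache_key _cache with
  | some v => v
  | none =>
    let pool := PySem.List.pyRange min_val (max_val + 1) _step
    let n := pool.length
    let init := if max_slots ≥ 0 then ([((0 : Nat), ([] : List Int))], [([] : List Int)])
                else ([], [])
    pvBLoop pool n max_slots.toNat init.1 init.2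

-- ===== PRECONDITION & SPEC =====
-- Pre_ excludes only _step = 0 without a cache hit: there Python's range(…, 0) raises ValueError in both programs.
def Pre_get_unique_combinations (min_val : Int) (max_val : Int) (max_slots : Int) (_cache : List (List Int × List (List Int))) (_step : Int) : Prop :=
  _step ≠ 0 ∨ (List.lookup [min_val, max_val, max_slots, _step] _cache).isSome = true
instance (min_val : Int) (max_val : Int) (max_slots : Int) (_cache : List (List Int × List (List Int))) (_step : Int) : Decidable (Pre_get_unique_combinations min_val max_val max_slots _cache _step) := by unfold Pre_get_unique_combinations; infer_instance

def pvWitness_get_unique_combinations : Int × Int × Int × (List (List Int × List (List Int))) × Int := (0, 2, 2, [], 1)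

def Spec_get_unique_combinations (min_val : Int) (max_val : Int) (max_slots : Int) (_cache : List (List Int × List (List Int))) (_step : Int) (out : List (List Int)) : Prop := out = get_unique_combinations_alt min_val max_val max_slots _cache _step
instance (min_val : Int) (max_val : Int) (max_slots : Int) (_cache : List (List Int × List (List Int))) (_step : Int) (out : List (List Int)) : Decidable (Spec_get_unique_combinations min_val max_val max_slots _cache _step out) := by unfold Spec_get_unique_combinations; infer_instance

-- ===== CLAIM (what is proved, stated in full; the proofs are below) =====
def Claim_equal_get_unique_combinations : Prop := ∀ (min_val : Int) (max_val : Int) (max_slots : Int) (_cache : List (List Int × List (List Int))) (_step : Int), Dom_get_unique_combinations min_val max_val max_slots _cache _step → Pre_get_unique_combinations min_val max_val max_slots _cache _step → Spec_get_unique_combinations min_val max_val max_slots _cache _step (get_unique_combinations min_val max_val max_slots _cache _step)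

-- ===== LEMMAS AND PROOFS =====

-- canonical iteration of pvBStep (proof-only helper)
def pvIter (pool : List Int) : Nat → List (Nat × List Int) → List (Nat × List Int)
  | 0, l => l
  | k + 1, l => pvIter pool k (pvBStep pool pool.length l)

theorem pvBStep_append (pool : List Int) (n : Nat) (l1 l2 : List (Nat × List Int)) :
    pvBStep pool n (l1 ++ l2) = pvBStep pool n l1 ++ pvBStep pool n l2 := by
  simp [pvBStep]

theorem pvIter_nil (pool : List Int) (k : Nat) : pvIter pool k [] = [] := by
  induction k with
  | zero => rfl
  | succ k ih => simp [pvIter, pvBStep, ih]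

theorem pvIter_append (pool : List Int) (k : Nat) (l1 l2 : List (Nat × List Int)) :
    pvIter pool k (l1 ++ l2) = pvIter pool k l1 ++ pvIter pool k l2 := by
  induction k generalizing l1 l2 with
  | zero => rfl
  | succ k ih => simp [pvIter, pvBStep_append, ih]

theorem pvIter_succ' (pool : List Int) (k : Nat) (l : List (Nat × List Int)) :
    pvIter pool (k + 1) l = pvBStep pool pool.length (pvIter pool k l) := by
  induction k generalizing l with
  | zero => rfl
  | succ k ih =>
    show pvIter pool (k + 1) (pvBStep pool pool.length l) = _
    rw [ih]
    rfl

theorem pvIter_map (pool : List Int) (k : Nat) (js : List Nat) (f : Nat → Nat × List Int) :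
    pvIter pool k (js.map f) = js.flatMap (fun j => pvIter pool k [f j]) := by
  induction js with
  | nil => simp [pvIter_nil]
  | cons j js ih =>
    have : (j :: js).map f = [f j] ++ js.map f := by simp
    rw [this, pvIter_append, ih]
    simp

theorem pvCombos_eq_nil_iff (r : Nat) (xs : List Int) :
    pvCombos r xs = [] ↔ xs.length < r := by
  induction xs generalizing r with
  | nil => cases r <;> simp [pvCombos]
  | cons x xs ih =>
    cases r with
    | zero => simp [pvCombos]
    | succ r =>
      simp [pvCombos, ih]
      try omega

theorem pvCombos_expand (r : Nat) (ys : List Int) :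
    pvCombos (r + 1) ys =
      (List.range ys.length).flatMap
        (fun i => (pvCombos r (ys.drop (i + 1))).map (fun t => ys.getD i 0 :: t)) := by
  induction ys with
  | nil => simp [pvCombos]
  | cons x xs ih =>
    rw [pvCombos, ih]
    simp only [List.length_cons, List.range_succ_eq_map, List.flatMap_cons, List.flatMap_map]
    simp [List.getD, List.drop_succ_cons]

theorem pvIter_key (pool : List Int) (k : Nat) :
    ∀ (s : Nat) (c : List Int), s ≤ pool.length →
      (pvIter pool k [(s, c)]).map Prod.snd
        = (pvCombos k (pool.drop s)).map (fun t => c ++ t) := by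
  induction k with
  | zero =>
    intro s c _hs
    simp [pvIter, pvCombos]
  | succ k ih =>
    intro s c hs
    have hstep : pvIter pool (k + 1) [(s, c)]
        = pvIter pool k (pvBStep pool pool.length [(s, c)]) := rfl
    rw [hstep]
    have hb : pvBStep pool pool.length [(s, c)]
        = (List.range' s (pool.length - s)).map (fun j => (j + 1, c ++ [pool.getD j 0])) := by
      simp [pvBStep]
    rw [hb, pvIter_map]
    rw [List.map_flatMap]
    have hre : List.range' s (pool.length - s) = (List.range (pool.length - s)).map (fun i => s + i) := by
      rw [List.range'_eq_map_range]
    rw [hre, List.flatMap_map]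
    -- right-hand side
    rw [pvCombos_expand, List.map_flatMap]
    have hlen : (pool.drop s).length = pool.length - s := by simp
    rw [hlen]
    apply List.flatMap_congr
    intro i hi
    have hi' : i < pool.length - s := List.mem_range.mp hi
    have h1 : s + i + 1 ≤ pool.length := by omega
    rw [ih (s + i + 1) (c ++ [pool.getD (s + i) 0]) h1]
    have hdd : (pool.drop s).drop (i + 1) = pool.drop (s + i + 1) := by
      rw [List.drop_drop]; congr 1; try omega
    have hgd : (pool.drop s).getD i 0 = pool.getD (s + i) 0 := by
      simp [List.getD, List.getElem?_drop]
    rw [hdd, hgd, List.map_map]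
    apply List.map_congr_left
    intro t _
    simp

theorem pvLoopEq (pool : List Int) (m : Nat) :
    ∀ (r : Nat) (acc : List (List Int)),
      pvALoop pool m (r + 1) acc = pvBLoop pool pool.length m (pvIter pool r [(0, [])]) acc := by
  induction m with
  | zero => intro r acc; rfl
  | succ m ih =>
    intro r acc
    have hsnd : (pvBStep pool pool.length (pvIter pool r [(0, [])])).map Prod.snd
        = pvCombos (r + 1) pool := by
      rw [← pvIter_succ']
      rw [pvIter_key pool (r + 1) 0 [] (Nat.zero_le _)]
      simp
    have hempty : (pvBStep pool pool.length (pvIter pool r [(0, [])])).isEmpty = true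
        ↔ pool.length < r + 1 := by
      rw [List.isEmpty_iff]
      constructor
      · intro h
        have : pvCombos (r + 1) pool = [] := by rw [← hsnd, h]; rfl
        exact (pvCombos_eq_nil_iff _ _).mp this
      · intro h
        have h0 : (pvBStep pool pool.length (pvIter pool r [(0, [])])).map Prod.snd = [] := by
          rw [hsnd]; exact (pvCombos_eq_nil_iff _ _).mpr h
        exact List.map_eq_nil_iff.mp h0
    rw [pvALoop, pvBLoop]
    by_cases hc : pool.length < r + 1
    · rw [if_pos (by exact_mod_cast hc)]
      simp only [hempty.mpr hc, if_true]
    · rw [if_neg (by exact_mod_cast hc)]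
      have hne : ¬ (pvBStep pool pool.length (pvIter pool r [(0, [])])).isEmpty = true := by
        rw [hempty]; exact hc
      simp only [hne, if_false, Bool.false_eq_true]
      rw [hsnd, ← pvIter_succ']
      exact ih (r + 1) (acc ++ pvCombos (r + 1) pool)

theorem pvMain (pool : List Int) (max_slots : Int) :
    pvALoop pool (max_slots + 1).toNat 0 []
      = (let init := if max_slots ≥ 0 then ([((0 : Nat), ([] : List Int))], [([] : List Int)])
                     else ([], []);
         pvBLoop pool pool.length max_slots.toNat init.1 init.2) := by
  by_cases h : max_slots ≥ 0
  · simp only [h, if_pos]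
    have h1 : (max_slots + 1).toNat = max_slots.toNat + 1 := by omega
    rw [h1, pvALoop]
    rw [if_neg (by push_cast; omega)]
    have := pvLoopEq pool max_slots.toNat 0 ([] ++ pvCombos 0 pool)
    simp only [pvIter] at this
    simpa [pvCombos] using this
  · have h0 : (max_slots + 1).toNat = 0 := by omega
    have h0' : max_slots.toNat = 0 := by omega
    simp only [if_neg h, h0, h0']
    rfl

-- ===== VERDICT (by name: the statement is the Claim_ definition above) =====
theorem get_unique_combinations_spec : Claim_equal_get_unique_combinations := by
  intro min_val max_val max_slots _cache _step _hdom _hpre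
  unfold Spec_get_unique_combinations get_unique_combinations get_unique_combinations_alt
  cases h : List.lookup [min_val, max_val, max_slots, _step] _cache with
  | some v => simp [h]
  | none =>
    simp only [h]
    exact pvMain _ max_slots
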